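-- pv_equiv track=rewrite | github.com/Vibenshus-Gymnasium-Pro/pyside6-2-rafael | roeversprog.py | oversaet_til_roeversprog
-- ===== SOURCE A (Python) =====
-- consonants = "bcdfghjklmnpqrstvwxz"
--
-- def oversaet_til_roeversprog(inputtekst):
--     """ This function translates from nornal language."""
--     outputtekst = ""
--
--     for i in inputtekst:
--         if i.lower() not in consonants:
--             outputtekst += i
--         else:
--             outputtekst += f"{i}o{i}"
--     return outputtekst
-- ===== SOURCE B (Python) =====
-- consonants = "bcdfghjklmnpqrstvwxz"
--
-- # translation table built once: every consonant (both cases) maps to 'c' + 'o' + 'c'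
-- _TABLE = str.maketrans({c: f"{c}o{c}" for ch in consonants for c in (ch, ch.upper())})
--
-- def oversaet_til_roeversprog(inputtekst):
--     """This function translates from normal language."""
--     return inputtekst.translate(_TABLE)
-- ===== Notes on version B (the rewrite author's own statement) =====
-- stated objective: idiomatic
-- what changed: Replaces the per-character if/else accumulation loop with a translation table built once from the consonant list and a single str.translate pass.
import Mathlib
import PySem

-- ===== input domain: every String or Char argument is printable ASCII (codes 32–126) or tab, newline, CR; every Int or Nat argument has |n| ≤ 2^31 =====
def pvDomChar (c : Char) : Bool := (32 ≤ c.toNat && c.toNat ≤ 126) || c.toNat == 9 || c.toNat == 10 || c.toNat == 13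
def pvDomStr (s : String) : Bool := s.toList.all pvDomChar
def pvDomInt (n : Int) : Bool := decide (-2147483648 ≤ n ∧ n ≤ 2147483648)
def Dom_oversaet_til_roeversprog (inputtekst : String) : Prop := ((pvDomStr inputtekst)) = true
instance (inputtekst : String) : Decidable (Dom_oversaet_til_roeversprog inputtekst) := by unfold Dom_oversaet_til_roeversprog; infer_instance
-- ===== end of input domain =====

-- B builds the consonant→"coc" translation table once and does a single translate pass (idiomatic).
-- ===== PORT A =====
def pvConsonants : List Char := "bcdfghjklmnpqrstvwxz".toList

def oversaet_til_roeversprog (inputtekst : String) : String :=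
  String.mk (inputtekst.toList.foldl (fun acc c =>
    acc ++ (if !(pvConsonants.contains (PySem.Chars.lowerChar c)) then [c] else [c, 'o', c])) [])

-- ===== PORT B =====
-- the translation table of Source B: both cases of each consonant map to c++"o"++c
def pvTable : PySem.Dict Char (List Char) :=
  pvConsonants.foldl (fun d c =>
    (d.insert c [c, 'o', c]).insert (PySem.Chars.upperChar c)
      [PySem.Chars.upperChar c, 'o', PySem.Chars.upperChar c]) PySem.Dict.empty

def oversaet_til_roeversprog_alt (inputtekst : String) : String :=
  String.mk (inputtekst.toList.flatMap (fun c => pvTable.getD c [c]))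

-- ===== PRECONDITION & SPEC =====
def Spec_oversaet_til_roeversprog (inputtekst : String) (out : String) : Prop := out = oversaet_til_roeversprog_alt inputtekst
instance (inputtekst : String) (out : String) : Decidable (Spec_oversaet_til_roeversprog inputtekst out) := by unfold Spec_oversaet_til_roeversprog; infer_instance

-- ===== CLAIM (what is proved, stated in full; the proofs are below) =====
def Claim_equal_oversaet_til_roeversprog : Prop := ∀ (inputtekst : String), Dom_oversaet_til_roeversprog inputtekst → Spec_oversaet_til_roeversprog inputtekst (oversaet_til_roeversprog inputtekst)

-- ===== LEMMAS AND PROOFS =====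

-- ===== VERDICT (by name: the statement is the Claim_ definition above) =====
-- per-character agreement, checked over every printable-ASCII / tab / newline / CR character
set_option maxRecDepth 100000 in
lemma pv_char_step : ∀ n ∈ List.range 128, pvDomChar (Char.ofNat n) = true →
    (if !(pvConsonants.contains (PySem.Chars.lowerChar (Char.ofNat n))) then [Char.ofNat n]
     else [Char.ofNat n, 'o', Char.ofNat n]) = pvTable.getD (Char.ofNat n) [Char.ofNat n] := by
  decide

set_option maxRecDepth 100000 in
theorem oversaet_til_roeversprog_spec : Claim_equal_oversaet_til_roeversprog := by
  intro s hdom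
  unfold Spec_oversaet_til_roeversprog oversaet_til_roeversprog oversaet_til_roeversprog_alt
  rw [PySem.List.foldl_append_eq_flatMap, List.nil_append]
  congr 1
  apply List.flatMap_congr
  intro c hc
  have hd : pvDomChar c = true := by
    have := hdom; unfold Dom_oversaet_til_roeversprog pvDomStr at this
    exact (List.all_eq_true.mp this) c hc
  have hlt : c.toNat ∈ List.range 128 := by
    simp only [List.mem_range]
    unfold pvDomChar at hd
    simp only [Bool.or_eq_true, Bool.and_eq_true, decide_eq_true_eq, beq_iff_eq] at hd
    omega
  have := pv_char_step c.toNat hlt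
  rw [Char.ofNat_toNat] at this
  exact this hd
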